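-- pv_equiv track=rewrite | github.com/waivegames-oss/umamusume-sweepy | module/umamusume/scenario/mant/inventory.py | plan_low_energy_recovery
-- ===== SOURCE A (Python) =====
-- ENERGY_ITEMS = {
--     'Vita 20': 20,
--     'Vita 40': 40,
--     'Vita 65': 65,
--     'Royal Kale Juice': 100,
-- }
--
-- def plan_low_energy_recovery(current_energy, owned_map, max_energy=100):
--     available = []
--     for item_name, raw_energy in sorted(ENERGY_ITEMS.items(), key=lambda x: x[1]):
--         qty = owned_map.get(item_name, 0)
--         if qty > 0:
--             available.append((item_name, raw_energy, qty))
--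
--     if not available:
--         return []
--
--     plan = []
--     energy = current_energy
--
--     for item_name, raw_energy, qty in reversed(available):
--         if energy >= max_energy:
--             break
--         while qty > 0 and energy + raw_energy <= max_energy:
--             plan.append(item_name)
--             energy += raw_energy
--             qty -= 1
--
--     if not plan:
--         smallest = available[0]
--         plan.append(smallest[0])
--
--     result = []
--     seen = {}
--     for name in plan:
--         if name not in seen:
--             seen[name] = 0
--         seen[name] += 1
--     for name, count in seen.items():
--         result.append((name, count))
--
--     return result
-- ===== SOURCE B (Python) =====
-- ENERGY_ITEMS = {
--     'Vita 20': 20,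
--     'Vita 40': 40,
--     'Vita 65': 65,
--     'Royal Kale Juice': 100,
-- }
--
-- def plan_low_energy_recovery(current_energy, owned_map, max_energy=100):
--     available = [
--         (name, raw, owned_map.get(name, 0))
--         for name, raw in sorted(ENERGY_ITEMS.items(), key=lambda x: x[1])
--         if owned_map.get(name, 0) > 0
--     ]
--     if not available:
--         return []
--     result = []
--     energy = current_energy
--     for name, raw, qty in reversed(available):
--         count = max(0, min(qty, (max_energy - energy) // raw))
--         if count > 0:
--             result.append((name, count))
--             energy += count * raw
--     if not result:
--         result.append((available[0][0], 1))
--     return result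
-- ===== Notes on version B (the rewrite author's own statement) =====
-- stated objective: simpler
-- what changed: Replaces A's unit-at-a-time while loop, intermediate flat plan list and seen-dict tallying pass by a single greedy pass that computes each item's used count with one clamped floor division and appends (name, count) directly.
import Mathlib
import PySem

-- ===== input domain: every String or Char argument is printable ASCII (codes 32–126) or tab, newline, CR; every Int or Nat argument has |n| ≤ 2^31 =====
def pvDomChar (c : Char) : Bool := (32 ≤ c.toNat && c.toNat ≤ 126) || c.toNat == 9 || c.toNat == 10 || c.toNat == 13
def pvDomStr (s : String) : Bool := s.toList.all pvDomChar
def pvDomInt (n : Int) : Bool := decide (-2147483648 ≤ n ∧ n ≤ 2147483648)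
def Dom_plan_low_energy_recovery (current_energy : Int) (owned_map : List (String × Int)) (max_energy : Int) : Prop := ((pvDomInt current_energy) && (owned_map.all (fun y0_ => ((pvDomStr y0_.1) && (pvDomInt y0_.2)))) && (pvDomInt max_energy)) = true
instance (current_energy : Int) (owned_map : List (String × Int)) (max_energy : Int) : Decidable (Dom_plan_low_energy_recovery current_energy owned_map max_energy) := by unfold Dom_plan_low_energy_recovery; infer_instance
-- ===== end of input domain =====

-- B replaces A's unit-at-a-time while loop, flat plan list and seen-dict tally by one greedy pass
-- that takes each item's count with a single clamped floor division (same return value).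

-- Module-level constant ENERGY_ITEMS (shared context of both Pythons), as its sorted-by-value items list.
def pvEnergyItems : List (String × Int) :=
  [("Vita 20", 20), ("Vita 40", 40), ("Vita 65", 65), ("Royal Kale Juice", 100)]

-- ===== PORT A =====
-- the inner 'while qty > 0 and energy + raw_energy <= max_energy' loop (appends item_name, one unit at a time)
def pvInnerA (name : String) (raw maxE : Int) (qty energy : Int) (plan : List String) :
    List String × Int :=
  if _h : 0 < qty ∧ energy + raw ≤ maxE then
    pvInnerA name raw maxE (qty - 1) (energy + raw) (plan ++ [name])
  else (plan, energy)
termination_by qty.toNat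
decreasing_by omega

-- the outer 'for … in reversed(available)' loop with its 'break'
def pvOuterA (maxE : Int) : List (String × Int × Int) → Int → List String → List String
  | [], _, plan => plan
  | (name, raw, qty) :: rest, energy, plan =>
    if energy ≥ maxE then plan
    else
      let r := pvInnerA name raw maxE qty energy plan
      pvOuterA maxE rest r.2 r.1

-- 'seen = {}; for name in plan: if name not in seen: seen[name] = 0; seen[name] += 1'
def pvTallyA (plan : List String) : PySem.Dict String Int :=
  plan.foldl
    (fun seen name =>
      let s := if seen.contains name = false then seen.insert name 0 else seen
      s.insert name (s.getD name 0 + 1))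
    PySem.Dict.empty

def plan_low_energy_recovery (current_energy : Int) (owned_map : List (String × Int)) (max_energy : Int) : List (String × Int) :=
  let available :=
    (PySem.List.sorted pvEnergyItems (fun x => x.2) false).foldl
      (fun acc p =>
        let qty := PySem.Dict.getD ⟨owned_map⟩ p.1 0
        if 0 < qty then acc ++ [(p.1, p.2, qty)] else acc) []
  match available with
  | [] => []
  | a0 :: rest =>
    let plan := pvOuterA max_energy ((a0 :: rest).reverse) current_energy []
    let plan := if plan = [] then plan ++ [a0.1] else plan
    (pvTallyA plan).items

-- ===== PORT B =====
def pvAvailB (owned_map : List (String × Int)) : List (String × Int × Int) :=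
  ((PySem.List.sorted pvEnergyItems (fun x => x.2) false).filter
      (fun p => decide (0 < PySem.Dict.getD ⟨owned_map⟩ p.1 0))).map
    (fun p => (p.1, p.2, PySem.Dict.getD ⟨owned_map⟩ p.1 0))

def pvOuterB (maxE : Int) : List (String × Int × Int) → Int → List (String × Int) → List (String × Int)
  | [], _, res => res
  | (name, raw, qty) :: rest, energy, res =>
    let count := max 0 (min qty (PySem.Int.floordiv (maxE - energy) raw))
    if 0 < count then pvOuterB maxE rest (energy + count * raw) (res ++ [(name, count)])
    else pvOuterB maxE rest energy res

def plan_low_energy_recovery_alt (current_energy : Int) (owned_map : List (String × Int)) (max_energy : Int) : List (String × Int) :=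
  match pvAvailB owned_map with
  | [] => []
  | a0 :: rest =>
    let res := pvOuterB max_energy ((a0 :: rest).reverse) current_energy []
    if res = [] then res ++ [(a0.1, 1)] else res

-- ===== PRECONDITION & SPEC =====
def Spec_plan_low_energy_recovery (current_energy : Int) (owned_map : List (String × Int)) (max_energy : Int) (out : List (String × Int)) : Prop := out = plan_low_energy_recovery_alt current_energy owned_map max_energy
instance (current_energy : Int) (owned_map : List (String × Int)) (max_energy : Int) (out : List (String × Int)) : Decidable (Spec_plan_low_energy_recovery current_energy owned_map max_energy out) := by unfold Spec_plan_low_energy_recovery; infer_instance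

-- ===== CLAIM (what is proved, stated in full; the proofs are below) =====
def Claim_equal_plan_low_energy_recovery : Prop := ∀ (current_energy : Int) (owned_map : List (String × Int)) (max_energy : Int), Dom_plan_low_energy_recovery current_energy owned_map max_energy → Spec_plan_low_energy_recovery current_energy owned_map max_energy (plan_low_energy_recovery current_energy owned_map max_energy)

-- ===== LEMMAS AND PROOFS =====

theorem pvAvail_eq (owned_map : List (String × Int)) :
    (PySem.List.sorted pvEnergyItems (fun x => x.2) false).foldl
      (fun acc p =>
        let qty := PySem.Dict.getD ⟨owned_map⟩ p.1 0
        if 0 < qty then acc ++ [(p.1, p.2, qty)] else acc) [] = pvAvailB owned_map := by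
  unfold pvAvailB
  rw [PySem.List.foldl_append_ite (p := fun p : String × Int => 0 < PySem.Dict.getD ⟨owned_map⟩ p.1 0)
      (f := fun p : String × Int => (p.1, p.2, PySem.Dict.getD ⟨owned_map⟩ p.1 0))]
  simp

theorem pvAvailB_raw_pos (owned_map : List (String × Int)) :
    ∀ t ∈ pvAvailB owned_map, 0 < t.2.1 := by
  intro t ht
  have hs : PySem.List.sorted pvEnergyItems (fun x => x.2) false = pvEnergyItems := by decide
  unfold pvAvailB at ht
  rw [hs] at ht
  simp only [pvEnergyItems, List.mem_map, List.mem_filter] at ht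
  obtain ⟨p, ⟨hp, _⟩, rfl⟩ := ht
  fin_cases hp <;> norm_num

theorem pvAvailB_names_nodup (owned_map : List (String × Int)) :
    ((pvAvailB owned_map).map (fun t => t.1)).Nodup := by
  have hs : PySem.List.sorted pvEnergyItems (fun x => x.2) false = pvEnergyItems := by decide
  unfold pvAvailB
  rw [hs, List.map_map]
  have h1 : (List.map ((fun t : String × Int × Int => t.1) ∘ (fun p : String × Int => (p.1, p.2, PySem.Dict.getD ⟨owned_map⟩ p.1 0)))
      (pvEnergyItems.filter (fun p => decide (0 < PySem.Dict.getD ⟨owned_map⟩ p.1 0)))).Sublist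
      (pvEnergyItems.map (fun p => p.1)) := List.Sublist.map _ List.filter_sublist
  refine List.Nodup.sublist h1 ?_
  decide

theorem pvInnerA_closed' (name : String) (raw maxE qty energy : Int) (plan : List String)
    (hraw : 0 < raw) :
    pvInnerA name raw maxE qty energy plan =
      (plan ++ List.replicate (max 0 (min qty ((maxE - energy) / raw))).toNat name,
       energy + max 0 (min qty ((maxE - energy) / raw)) * raw) := by
  fun_induction pvInnerA name raw maxE qty energy plan with
  | case1 qty energy plan h ih =>
    rw [ih]
    have hne : raw ≠ 0 := by omega
    have hq : (maxE - (energy + raw)) / raw = (maxE - energy) / raw - 1 := by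
      have he : maxE - (energy + raw) = (maxE - energy) + (-1) * raw := by ring
      rw [he, Int.add_mul_ediv_right _ _ hne]; ring
    have h1 : 1 ≤ (maxE - energy) / raw := by
      rw [Int.le_ediv_iff_mul_le hraw]; omega
    set q := (maxE - energy) / raw with hqdef
    have hc : max 0 (min qty q) = max 0 (min (qty - 1) (q - 1)) + 1 := by omega
    have hcn : (max 0 (min qty q)).toNat = (max 0 (min (qty - 1) (q - 1))).toNat + 1 := by omega
    rw [hq]
    refine Prod.ext ?_ ?_
    · show plan ++ [name] ++ List.replicate (max 0 (min (qty - 1) (q - 1))).toNat name =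
        plan ++ List.replicate (max 0 (min qty q)).toNat name
      rw [hcn, List.replicate_succ]; simp
    · show energy + raw + max 0 (min (qty - 1) (q - 1)) * raw = energy + max 0 (min qty q) * raw
      rw [hc]; ring
  | case2 qty energy plan h =>
    have hc : max 0 (min qty ((maxE - energy) / raw)) = 0 := by
      by_cases hq : 0 < qty
      · have h2 : maxE < energy + raw := by
          rcases not_and_or.mp h with h' | h' <;> omega
        have h3 : ¬ (1 ≤ (maxE - energy) / raw) := by
          rw [Int.le_ediv_iff_mul_le hraw]; omega
        omega
      · omega
    rw [hc]; simp

theorem pvInnerA_closed (name : String) (raw maxE qty energy : Int) (plan : List String)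
    (hraw : 0 < raw) :
    pvInnerA name raw maxE qty energy plan =
      (plan ++ List.replicate (max 0 (min qty (PySem.Int.floordiv (maxE - energy) raw))).toNat name,
       energy + max 0 (min qty (PySem.Int.floordiv (maxE - energy) raw)) * raw) := by
  rw [PySem.Int.floordiv_eq_ediv_of_pos hraw]
  exact pvInnerA_closed' name raw maxE qty energy plan hraw

theorem pvOuterB_acc (maxE : Int) (items : List (String × Int × Int)) (energy : Int)
    (res : List (String × Int)) :
    pvOuterB maxE items energy res = res ++ pvOuterB maxE items energy [] := by
  induction items generalizing energy res with
  | nil => simp [pvOuterB]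
  | cons t rest ih =>
    obtain ⟨n, raw, qty⟩ := t
    simp only [pvOuterB]
    split
    · rw [ih, ih (res := [] ++ [(n, _)])]; simp
    · exact ih _ _

theorem pvOuterB_sated (maxE : Int) (items : List (String × Int × Int)) (energy : Int)
    (hr : ∀ t ∈ items, 0 < t.2.1) (h : maxE ≤ energy) :
    pvOuterB maxE items energy [] = [] := by
  induction items with
  | nil => simp [pvOuterB]
  | cons t rest ih =>
    obtain ⟨n, raw, qty⟩ := t
    have hraw : 0 < raw := hr _ (List.mem_cons_self)
    have hq : PySem.Int.floordiv (maxE - energy) raw ≤ 0 := by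
      rw [PySem.Int.floordiv_eq_ediv_of_pos hraw]
      have h3 : ¬ (1 ≤ (maxE - energy) / raw) := by
        rw [Int.le_ediv_iff_mul_le hraw]; omega
      omega
    have hc : max 0 (min qty (PySem.Int.floordiv (maxE - energy) raw)) = 0 := by omega
    simp only [pvOuterB, hc]
    simp only [lt_irrefl, if_false]
    exact ih (fun t ht => hr t (List.mem_cons_of_mem _ ht))

theorem pvOuterB_pos (maxE : Int) (items : List (String × Int × Int)) (energy : Int) :
    ∀ p ∈ pvOuterB maxE items energy [], 0 < p.2 := by
  induction items generalizing energy with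
  | nil => simp [pvOuterB]
  | cons t rest ih =>
    obtain ⟨n, raw, qty⟩ := t
    intro p hp
    simp only [pvOuterB] at hp
    split at hp
    · rw [pvOuterB_acc] at hp
      rcases List.mem_append.mp hp with hp | hp
      · simp at hp; subst hp; assumption
      · exact ih _ _ hp
    · exact ih _ _ hp

theorem pvOuterB_names_sublist (maxE : Int) (items : List (String × Int × Int)) (energy : Int) :
    ((pvOuterB maxE items energy []).map (fun p => p.1)).Sublist
      (items.map (fun t => t.1)) := by
  induction items generalizing energy with
  | nil => simp [pvOuterB]
  | cons t rest ih =>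
    obtain ⟨n, raw, qty⟩ := t
    simp only [pvOuterB]
    split
    · rw [pvOuterB_acc]
      simp only [List.map_cons, List.nil_append, List.map_append, List.map_cons, List.map_nil]
      exact List.Sublist.cons₂ _ (ih _)
    · exact List.Sublist.cons _ (ih _)

theorem pvOuterA_eq_flat (maxE : Int) (items : List (String × Int × Int)) (energy : Int)
    (plan : List String) (hr : ∀ t ∈ items, 0 < t.2.1) :
    pvOuterA maxE items energy plan =
      plan ++ (pvOuterB maxE items energy []).flatMap (fun p => List.replicate p.2.toNat p.1) := by
  induction items generalizing energy plan with
  | nil => simp [pvOuterA, pvOuterB]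
  | cons t rest ih =>
    obtain ⟨n, raw, qty⟩ := t
    have hraw : 0 < raw := hr _ (List.mem_cons_self)
    have hrest : ∀ t ∈ rest, 0 < t.2.1 := fun t ht => hr t (List.mem_cons_of_mem _ ht)
    by_cases hsat : energy ≥ maxE
    · rw [pvOuterB_sated maxE ((n, raw, qty) :: rest) energy hr hsat]
      simp only [pvOuterA, hsat, if_true, List.flatMap_nil, List.append_nil]
    · simp only [pvOuterA, pvOuterB, hsat, if_false]
      rw [pvInnerA_closed _ _ _ _ _ _ hraw]
      set c := max 0 (min qty (PySem.Int.floordiv (maxE - energy) raw)) with hcdef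
      by_cases hc : 0 < c
      · simp only [hc, if_true]
        rw [ih _ _ hrest, pvOuterB_acc maxE rest _ ([] ++ [(n, c)])]
        simp [List.append_assoc]
      · have hc0 : c = 0 := by omega
        simp only [hc, if_false]
        rw [ih _ _ hrest, hc0]
        simp

theorem pvTallyA_eq_counter (plan : List String) :
    pvTallyA plan = PySem.Dict.counter plan := by
  rw [PySem.Dict.counter_eq_foldl]
  unfold pvTallyA
  apply PySem.List.foldl_congr_mem
  intro d n _
  by_cases hc : d.contains n
  · simp only [hc]
    simp [PySem.Dict.modify]
  · have hcf : d.contains n = false := by simpa using hc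
    simp only [hcf]
    simp only [PySem.Dict.modify]
    rw [if_pos trivial, PySem.Dict.getD_insert_self, PySem.Dict.insert_insert_self,
      PySem.Dict.getD_of_not_contains _ _ hcf]

theorem pvMemOfList {y : String} {xs : List String} (h : y ∈ PySem.Set.ofList xs) : y ∈ xs := by
  simpa [PySem.Set.mem_ofList] using h

theorem pvOfList_replicate (k : Nat) (hk : 0 < k) (n : String) :
    PySem.Set.ofList (List.replicate k n) = [n] := by
  obtain ⟨k, rfl⟩ := Nat.exists_eq_succ_of_ne_zero (by omega : k ≠ 0)
  rw [List.replicate_succ, PySem.Set.ofList_cons]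
  have hd : PySem.Set.discard (PySem.Set.ofList (List.replicate k n)) n = [] := by
    refine List.eq_nil_iff_forall_not_mem.mpr (fun y hy => ?_)
    rw [PySem.Set.mem_discard] at hy
    exact hy.2 (List.eq_of_mem_replicate (pvMemOfList hy.1))
  rw [hd]

theorem pvTally_flat' (blocks : List (String × Int))
    (hnd : (blocks.map (fun p => p.1)).Nodup) (hpos : ∀ p ∈ blocks, 0 < p.2) :
    (PySem.Set.ofList (blocks.flatMap (fun p => List.replicate p.2.toNat p.1))).map
        (fun k => (k, ((blocks.flatMap (fun p => List.replicate p.2.toNat p.1)).count k : Int)))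
      = blocks := by
  induction blocks with
  | nil => simp
  | cons p rest ih =>
    obtain ⟨n, c⟩ := p
    have hcpos : 0 < c := hpos _ (List.mem_cons_self)
    have hndr : (rest.map (fun p => p.1)).Nodup := (List.nodup_cons.mp hnd).2
    have hnn : n ∉ rest.map (fun p => p.1) := (List.nodup_cons.mp hnd).1
    have hposr : ∀ p ∈ rest, 0 < p.2 := fun p hp => hpos p (List.mem_cons_of_mem _ hp)
    set restPlan := rest.flatMap (fun p => List.replicate p.2.toNat p.1) with hrp
    have hmemflat : ∀ y ∈ restPlan, y ∈ rest.map (fun p => p.1) := by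
      intro y hy
      rw [hrp, List.mem_flatMap] at hy
      obtain ⟨q, hq, hy⟩ := hy
      rw [List.eq_of_mem_replicate hy]
      exact List.mem_map_of_mem hq
    have hnrp : n ∉ restPlan := fun h => hnn (hmemflat _ h)
    have hflat : (((n, c) :: rest).flatMap (fun p => List.replicate p.2.toNat p.1))
        = List.replicate c.toNat n ++ restPlan := by simp [hrp]
    rw [hflat]
    have hset : PySem.Set.ofList (List.replicate c.toNat n ++ restPlan)
        = n :: PySem.Set.ofList restPlan := by
      rw [PySem.Set.ofList_append, pvOfList_replicate c.toNat (by omega) n]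
      have : PySem.Set.update [n] restPlan
          = [n] ++ (PySem.Set.ofList restPlan).filter (fun y => !(PySem.Set.contains [n] y)) :=
        PySem.Set.update_eq_append_filter _ _
      rw [this]
      have hfilter : (PySem.Set.ofList restPlan).filter (fun y => !(PySem.Set.contains [n] y))
          = PySem.Set.ofList restPlan := by
        refine List.filter_eq_self.mpr (fun y hy => ?_)
        have hyn : y ≠ n := by
          intro h; subst h
          exact hnrp (pvMemOfList hy)
        simp [hyn]
      rw [hfilter]; rfl
    rw [hset, List.map_cons]
    have hcount_n : (List.replicate c.toNat n ++ restPlan).count n = c.toNat := by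
      rw [List.count_append, List.count_replicate, List.count_eq_zero.mpr hnrp]
      simp
    have hhead : ((n, ((List.replicate c.toNat n ++ restPlan).count n : Int)) : String × Int) = (n, c) := by
      rw [hcount_n]; simp [Int.toNat_of_nonneg (le_of_lt hcpos)]
    rw [hhead]
    congr 1
    rw [← ih hndr hposr]
    refine List.map_congr_left (fun k hk => ?_)
    have hkn : k ≠ n := by
      intro h; subst h
      exact hnrp (pvMemOfList hk)
    rw [List.count_append, List.count_replicate, if_neg (by simpa using hkn.symm)]
    simp

theorem pvTally_flat (blocks : List (String × Int))
    (hnd : (blocks.map (fun p => p.1)).Nodup) (hpos : ∀ p ∈ blocks, 0 < p.2) :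
    (PySem.Dict.counter (blocks.flatMap (fun p => List.replicate p.2.toNat p.1))).items
      = blocks := by
  rw [PySem.Dict.items_counter]
  exact pvTally_flat' blocks hnd hpos

theorem pv_main (current_energy : Int) (owned_map : List (String × Int)) (max_energy : Int) :
    plan_low_energy_recovery current_energy owned_map max_energy
      = plan_low_energy_recovery_alt current_energy owned_map max_energy := by
  unfold plan_low_energy_recovery plan_low_energy_recovery_alt
  rw [pvAvail_eq owned_map]
  cases hA : pvAvailB owned_map with
  | nil => rfl
  | cons a0 rest =>
    simp only []
    have hr : ∀ t ∈ (a0 :: rest).reverse, 0 < t.2.1 := by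
      intro t ht
      exact pvAvailB_raw_pos owned_map t (hA ▸ List.mem_reverse.mp ht)
    have hplan : pvOuterA max_energy ((a0 :: rest).reverse) current_energy []
        = (pvOuterB max_energy ((a0 :: rest).reverse) current_energy []).flatMap
            (fun p => List.replicate p.2.toNat p.1) := by
      rw [pvOuterA_eq_flat _ _ _ _ hr]; simp
    set blocks := pvOuterB max_energy ((a0 :: rest).reverse) current_energy [] with hb
    have hpos : ∀ p ∈ blocks, 0 < p.2 := pvOuterB_pos _ _ _
    have hnd : (blocks.map (fun p => p.1)).Nodup := by
      refine List.Nodup.sublist (pvOuterB_names_sublist max_energy _ current_energy) ?_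
      rw [List.map_reverse, List.nodup_reverse, ← hA]
      exact pvAvailB_names_nodup owned_map
    rw [hplan]
    cases hbn : blocks with
    | nil =>
      simp only [List.flatMap_nil, List.nil_append]
      rw [if_pos trivial, if_pos trivial, pvTallyA_eq_counter]
      have h1 := pvTally_flat [(a0.1, (1 : Int))] (by simp) (by simp)
      simpa using h1
    | cons b0 bs =>
      have hb0 : 0 < b0.2 := hpos b0 (hbn ▸ List.mem_cons_self)
      have hne : ((b0 :: bs).flatMap (fun p => List.replicate p.2.toNat p.1)) ≠ [] := by
        simp only [List.flatMap_cons, ne_eq, List.append_eq_nil_iff, not_and]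
        intro h
        exact absurd h (by simp [List.replicate_eq_nil_iff]; omega)
      rw [if_neg hne, if_neg (List.cons_ne_nil b0 bs), pvTallyA_eq_counter]
      rw [hbn] at hnd hpos
      exact pvTally_flat (b0 :: bs) hnd hpos

-- ===== VERDICT (by name: the statement is the Claim_ definition above) =====
theorem plan_low_energy_recovery_spec : Claim_equal_plan_low_energy_recovery := by
  intro ce om me _
  exact pv_main ce om me
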